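-- pv_equiv track=rewrite | github.com/Leandrosmoreira/AMM-Polymarket-Backtest | src/log_processor.py | group_ticks_by_market
-- ===== SOURCE A (Python) =====
-- from typing import Dict, Any, List, Optional, Tuple, Generator
-- from collections import defaultdict
--
-- FIFTEEN_MIN_MS = 15 * 60 * 1000  # 900000 ms
--
-- def get_market_start_timestamp(timestamp_ms: int) -> int:
--     """
--     Get the start timestamp of the 15-minute market containing this timestamp.
--
--     Markets start at X:00, X:15, X:30, X:45.
--
--     Args:
--         timestamp_ms: Any timestamp in milliseconds
--
--     Returns:
--         Start timestamp of the market period in milliseconds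
--     """
--     return (timestamp_ms // FIFTEEN_MIN_MS) * FIFTEEN_MIN_MS
--
-- def group_ticks_by_market(
--     ticks: List[Dict[str, Any]]
-- ) -> Dict[int, List[Dict[str, Any]]]:
--     """
--     Group ticks by 15-minute market period.
--
--     Args:
--         ticks: List of tick dictionaries
--
--     Returns:
--         Dictionary mapping market_start to list of ticks
--     """
--     markets = defaultdict(list)
--
--     for tick in ticks:
--         market_start = get_market_start_timestamp(tick['ts'])
--         markets[market_start].append(tick)
--
--     # Sort ticks within each market
--     for market_start in markets:
--         markets[market_start].sort(key=lambda x: x['ts'])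
--
--     return dict(markets)
-- ===== SOURCE B (Python) =====
-- FIFTEEN_MIN_MS = 15 * 60 * 1000  # 900000 ms
--
--
-- def get_market_start_timestamp(timestamp_ms: int) -> int:
--     return (timestamp_ms // FIFTEEN_MIN_MS) * FIFTEEN_MIN_MS
--
--
-- def group_ticks_by_market(ticks):
--     """One pass: keep every bucket sorted while building it, inserting each
--     tick right after the existing ticks with ts <= its ts (so ties keep
--     arrival order, exactly like a stable sort). No per-bucket sort pass."""
--     markets = {}
--     for tick in ticks:
--         bucket = markets.setdefault(get_market_start_timestamp(tick['ts']), [])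
--         i = 0
--         while i < len(bucket) and bucket[i]['ts'] <= tick['ts']:
--             i += 1
--         bucket.insert(i, tick)
--     return markets
-- ===== Notes on version B (the rewrite author's own statement) =====
-- stated objective: alternative
-- what changed: B replaces A's two-phase 'append everything into buckets, then sort each bucket' with a single pass that keeps every bucket sorted as it is built, inserting each tick after the existing ticks with ts <= its ts (ties keep arrival order, matching the stable sort).
import Mathlib
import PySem

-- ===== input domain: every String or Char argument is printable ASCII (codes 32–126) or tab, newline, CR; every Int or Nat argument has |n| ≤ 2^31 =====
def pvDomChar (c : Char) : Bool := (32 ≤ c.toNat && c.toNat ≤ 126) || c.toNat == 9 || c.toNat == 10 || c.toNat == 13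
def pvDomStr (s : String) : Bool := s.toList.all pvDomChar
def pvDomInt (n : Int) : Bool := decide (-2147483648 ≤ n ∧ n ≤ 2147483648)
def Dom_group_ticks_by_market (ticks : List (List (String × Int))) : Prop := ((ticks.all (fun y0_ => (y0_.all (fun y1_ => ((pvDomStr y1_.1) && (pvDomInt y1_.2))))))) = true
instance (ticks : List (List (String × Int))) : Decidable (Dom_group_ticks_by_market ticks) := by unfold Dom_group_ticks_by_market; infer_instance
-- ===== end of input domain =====

-- B replaces A's "bucket everything, then sort every bucket" by a single pass that keeps each
-- bucket sorted while building it (insertion after equal timestamps = stability); objective: alternative.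

-- ===== PORT A =====
-- tick['ts'] — Pre_ guarantees the key is present, so the .getD 0 default is never taken
def pvTs (t : List (String × Int)) : Int := (PySem.Dict.get? ⟨t⟩ "ts").getD 0

-- get_market_start_timestamp: (ts // 900000) * 900000
def pvMk (t : List (String × Int)) : Int := PySem.Int.floordiv (pvTs t) 900000 * 900000

def group_ticks_by_market (ticks : List (List (String × Int))) : List (Int × List (List (String × Int))) :=
  -- markets = defaultdict(list); for tick: markets[k].append(tick)
  let markets : PySem.Dict Int (List (List (String × Int))) :=
    ticks.foldl (fun d t => PySem.Dict.insert d (pvMk t) (PySem.Dict.getD d (pvMk t) [] ++ [t])) ⟨[]⟩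
  -- for market_start in markets: markets[market_start].sort(key=lambda x: x['ts'])
  markets.items.map (fun p => (p.1, PySem.List.sorted p.2 pvTs false))

-- ===== PORT B =====
-- the while loop of Source B: walk past every element with ts <= tick['ts'], insert there
def pvIns (bucket : List (List (String × Int))) (t : List (String × Int)) : List (List (String × Int)) :=
  match bucket with
  | [] => [t]
  | y :: ys => if pvTs y ≤ pvTs t then y :: pvIns ys t else t :: y :: ys

def group_ticks_by_market_alt (ticks : List (List (String × Int))) : List (Int × List (List (String × Int))) :=
  -- markets = {}; for tick: bucket = markets.setdefault(k, []); insert tick at its sorted spot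
  (ticks.foldl (fun d t => PySem.Dict.insert d (pvMk t) (pvIns (PySem.Dict.getD d (pvMk t) []) t))
    (⟨[]⟩ : PySem.Dict Int (List (List (String × Int))))).items

-- ===== PRECONDITION & SPEC =====
-- Pre_ excludes exactly the ticks without a 'ts' key, on which A raises KeyError.
def Pre_group_ticks_by_market (ticks : List (List (String × Int))) : Prop :=
  (ticks.all (fun t => (t.find? (fun p => p.1 == "ts")).isSome)) = true
instance (ticks : List (List (String × Int))) : Decidable (Pre_group_ticks_by_market ticks) := by unfold Pre_group_ticks_by_market; infer_instance

def pvWitness_group_ticks_by_market : (List (List (String × Int))) :=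
  [[("ts", 900001), ("p", 5)], [("ts", 1)], [("ts", 900000)]]

def Spec_group_ticks_by_market (ticks : List (List (String × Int))) (out : List (Int × List (List (String × Int)))) : Prop := out = group_ticks_by_market_alt ticks
instance (ticks : List (List (String × Int))) (out : List (Int × List (List (String × Int)))) : Decidable (Spec_group_ticks_by_market ticks out) := by unfold Spec_group_ticks_by_market; infer_instance

-- ===== CLAIM (what is proved, stated in full; the proofs are below) =====
def Claim_equal_group_ticks_by_market : Prop := ∀ (ticks : List (List (String × Int))), Dom_group_ticks_by_market ticks → Pre_group_ticks_by_market ticks → Spec_group_ticks_by_market ticks (group_ticks_by_market ticks)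

-- ===== LEMMAS AND PROOFS =====

-- Source B's while-loop insertion is exactly PySem's insertBy for the key pvTs
theorem pvIns_eq_insertBy (l : List (List (String × Int))) (t : List (String × Int)) :
    pvIns l t = PySem.List.insertBy (fun a b => decide (pvTs a < pvTs b)) t l := by
  induction l with
  | nil => rfl
  | cons y ys ih =>
    by_cases h : pvTs y ≤ pvTs t
    · simp [pvIns, PySem.List.insertBy, h, not_lt.mpr h, ih]
    · simp [pvIns, PySem.List.insertBy, h, not_le.mp h]

-- appending one element and re-sorting = inserting it into the sorted list
theorem sorted_snoc (l : List (List (String × Int))) (t : List (String × Int)) :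
    PySem.List.sorted (l ++ [t]) pvTs false = pvIns (PySem.List.sorted l pvTs false) t := by
  simp [PySem.List.sorted_eq_foldl_insertBy, List.foldl_append, pvIns_eq_insertBy]

-- "sort every bucket of the dict", as A's final pass does
def pvMv (items : List (Int × List (List (String × Int)))) : List (Int × List (List (String × Int))) :=
  items.map (fun p => (p.1, PySem.List.sorted p.2 pvTs false))

theorem find?_pvMv (items : List (Int × List (List (String × Int)))) (k : Int) :
    (pvMv items).find? (fun p => p.1 == k)
      = (items.find? (fun p => p.1 == k)).map (fun p => (p.1, PySem.List.sorted p.2 pvTs false)) := by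
  simp only [pvMv, List.find?_map]
  rfl

theorem getD_pvMv (items : List (Int × List (List (String × Int)))) (k : Int) :
    PySem.Dict.getD (⟨pvMv items⟩ : PySem.Dict Int _) k []
      = PySem.List.sorted (PySem.Dict.getD (⟨items⟩ : PySem.Dict Int _) k []) pvTs false := by
  simp only [PySem.Dict.getD, PySem.Dict.get?, find?_pvMv]
  cases items.find? (fun p => p.1 == k) <;> rfl

theorem contains_pvMv (items : List (Int × List (List (String × Int)))) (k : Int) :
    PySem.Dict.contains (⟨pvMv items⟩ : PySem.Dict Int _) k
      = PySem.Dict.contains (⟨items⟩ : PySem.Dict Int _) k := by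
  simp only [PySem.Dict.contains, pvMv, List.any_map]
  rfl

theorem insert_pvMv (items : List (Int × List (List (String × Int)))) (k : Int)
    (v : List (List (String × Int))) :
    pvMv (PySem.Dict.insert (⟨items⟩ : PySem.Dict Int _) k v).items
      = (PySem.Dict.insert (⟨pvMv items⟩ : PySem.Dict Int _) k
          (PySem.List.sorted v pvTs false)).items := by
  by_cases h : PySem.Dict.contains (⟨items⟩ : PySem.Dict Int _) k = true
  · simp only [PySem.Dict.insert, h, contains_pvMv, if_pos]
    simp only [pvMv, List.map_map]
    apply List.map_congr_left
    intro p _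
    by_cases hp : p.1 = k <;> simp [hp]
  · simp only [PySem.Dict.insert, h, contains_pvMv, if_neg, Bool.not_eq_true]
    simp [pvMv]

-- the two build loops stay in lockstep: B's dict is A's dict with every bucket sorted
theorem build_lockstep (ticks : List (List (String × Int)))
    (items : List (Int × List (List (String × Int)))) :
    pvMv (ticks.foldl
        (fun d t => PySem.Dict.insert d (pvMk t) (PySem.Dict.getD d (pvMk t) [] ++ [t]))
        (⟨items⟩ : PySem.Dict Int _)).items
      = (ticks.foldl
          (fun d t => PySem.Dict.insert d (pvMk t) (pvIns (PySem.Dict.getD d (pvMk t) []) t))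
          (⟨pvMv items⟩ : PySem.Dict Int _)).items := by
  induction ticks generalizing items with
  | nil => rfl
  | cons t ts ih =>
    simp only [List.foldl_cons]
    rw [show (PySem.Dict.insert (⟨items⟩ : PySem.Dict Int _) (pvMk t)
          (PySem.Dict.getD (⟨items⟩ : PySem.Dict Int _) (pvMk t) [] ++ [t]))
        = ⟨(PySem.Dict.insert (⟨items⟩ : PySem.Dict Int _) (pvMk t)
          (PySem.Dict.getD (⟨items⟩ : PySem.Dict Int _) (pvMk t) [] ++ [t])).items⟩ from rfl,
      ih, insert_pvMv, sorted_snoc, getD_pvMv]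

-- ===== VERDICT (by name: the statement is the Claim_ definition above) =====
theorem group_ticks_by_market_spec : Claim_equal_group_ticks_by_market := by
  intro ticks _ _
  unfold Spec_group_ticks_by_market group_ticks_by_market group_ticks_by_market_alt
  exact build_lockstep ticks []
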